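-- pv_equiv track=rewrite | github.com/Arsen1302/Code-copy-detector | TestData/solutions/problem_313_4_1.py | solution_313_4_1
-- ===== SOURCE A (Python) =====
-- from typing import List
--
-- def solution_313_4_1(board: List[List[str]], click: List[int]) -> List[List[str]]:
--     neighbors = [(-1, 0), (0, -1), (1, 0), (0, 1),
--                  (-1, -1), (1, -1), (1, 1), (-1, 1)]
--
--     def solution_313_4_2(mines, r, c):
--         if r < 0 or r >= m  or c < 0 or c >= n or board[r][c] == 'M':
--             return
--         mines[r][c] += 1
--
--     def solution_313_4_3(board, r, c):
--         if r < 0 or r >= m or c < 0 or c >= n or board[r][c] != 'E':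
--             return
--
--         if mines[r][c] > 0:
--             board[r][c] = str(mines[r][c])
--             return
--
--         board[r][c] = 'B'
--         for dr, dc in neighbors:
--             solution_313_4_3(board, r + dr, c + dc)
--
--     m = len(board)
--     n = len(board[0])
--     mines = [[0] * n for _ in range(m)]
--     for r in range(m):
--         for c in range(n):
--             if board[r][c] == 'M':
--                 for dr, dc in neighbors:
--                     solution_313_4_2(mines, r + dr, c + dc)
--
--     r, c = click
--     if board[r][c] == 'M':
--         board[r][c] = 'X'
--     elif board[r][c] == 'E':
--         solution_313_4_3(board, r, c)
--
--     return board
-- ===== SOURCE B (Python) =====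
-- from typing import List
--
-- NEIGHBORS = [(-1, 0), (0, -1), (1, 0), (0, 1),
--              (-1, -1), (1, -1), (1, 1), (-1, 1)]
--
-- def solution_313_4_1(board: List[List[str]], click: List[int]) -> List[List[str]]:
--     # On-demand flood fill: no precomputed adjacency table; mutates board in place like A.
--     m, n = len(board), len(board[0])
--
--     def reveal(r, c):
--         if r < 0 or r >= m or c < 0 or c >= n or board[r][c] != 'E':
--             return
--         count = sum(1 for dr, dc in NEIGHBORS
--                     if 0 <= r + dr < m and 0 <= c + dc < n
--                     and board[r + dr][c + dc] == 'M')
--         if count > 0: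
--             board[r][c] = str(count)
--         else:
--             board[r][c] = 'B'
--             for dr, dc in NEIGHBORS:
--                 reveal(r + dr, c + dc)
--
--     r, c = click
--     if board[r][c] == 'M':
--         board[r][c] = 'X'
--     elif board[r][c] == 'E':
--         reveal(r, c)
--     return board
-- ===== Notes on version B (the rewrite author's own statement) =====
-- stated objective: simpler
-- what changed: B drops A's full m*n precomputed neighbour-mine table and instead counts the 8 adjacent mines on demand inside a single flood fill from the click.
import Mathlib
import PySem

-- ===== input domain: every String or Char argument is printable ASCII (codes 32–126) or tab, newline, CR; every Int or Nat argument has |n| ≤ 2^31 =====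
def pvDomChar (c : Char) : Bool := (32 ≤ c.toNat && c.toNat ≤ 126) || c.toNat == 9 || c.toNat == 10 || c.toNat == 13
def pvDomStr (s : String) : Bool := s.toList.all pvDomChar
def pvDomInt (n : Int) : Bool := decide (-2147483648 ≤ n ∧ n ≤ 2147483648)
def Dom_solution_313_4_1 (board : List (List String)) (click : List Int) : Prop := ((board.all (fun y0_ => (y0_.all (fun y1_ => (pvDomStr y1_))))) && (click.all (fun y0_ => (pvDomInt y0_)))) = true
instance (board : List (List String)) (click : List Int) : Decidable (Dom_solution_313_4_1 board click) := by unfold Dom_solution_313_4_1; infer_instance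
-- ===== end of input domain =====

-- B drops A's full precomputed adjacency table and counts adjacent mines on demand inside a single
-- flood fill (objective: simpler).  Both Pythons mutate `board` in place and return it; the theorems
-- below are about the returned value.

-- ===== PORT A =====
-- shared low-level plumbing: board cell read/write at nonnegative indices (every use is guarded)
def pvNbrs : List (Int × Int) := [(-1,0),(0,-1),(1,0),(0,1),(-1,-1),(1,-1),(1,1),(-1,1)]

def pvGet (b : List (List String)) (r c : Int) : String := (b.getD r.toNat []).getD c.toNat ""

def pvGetI (t : List (List Int)) (r c : Int) : Int := (t.getD r.toNat []).getD c.toNat 0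

def pvSet {α : Type} (b : List (List α)) (r c : Int) (v : α) : List (List α) :=
  b.set r.toNat ((b.getD r.toNat []).set c.toNat v)

-- solution_313_4_2: increment the mines table at (r, c) unless out of bounds or a mine
def pvInc (board : List (List String)) (m n : Nat) (t : List (List Int)) (r c : Int) : List (List Int) :=
  if r < 0 ∨ (m:Int) ≤ r ∨ c < 0 ∨ (n:Int) ≤ c ∨ pvGet board r c = "M" then t
  else pvSet t r c (pvGetI t r c + 1)

-- A's precompute: mines = [[0]*n]*m, then for every 'M' cell bump its 8 neighbours
def pvMines (board : List (List String)) (m n : Nat) : List (List Int) :=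
  (List.range m).foldl (fun t (i : Nat) =>
    (List.range n).foldl (fun t (j : Nat) =>
      if pvGet board (i:Int) (j:Int) = "M" then
        pvNbrs.foldl (fun t d => pvInc board m n t ((i:Int) + d.1) ((j:Int) + d.2)) t
      else t) t)
    (List.replicate m (List.replicate n (0:Int)))

-- solution_313_4_3 (fuel m*n+1 bounds the recursion depth; Python's recursion converts an 'E'
-- before each nested call, so depth never exceeds the number of 'E' cells plus one)
def pvDfsA (mines : List (List Int)) (m n : Nat) : Nat → List (List String) → Int → Int → List (List String)
  | 0, b, _, _ => b
  | fuel+1, b, r, c =>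
    if r < 0 ∨ (m:Int) ≤ r ∨ c < 0 ∨ (n:Int) ≤ c ∨ pvGet b r c ≠ "E" then b
    else if 0 < pvGetI mines r c then pvSet b r c (PySem.Int.toStr (pvGetI mines r c))
    else pvNbrs.foldl (fun b d => pvDfsA mines m n fuel b (r + d.1) (c + d.2)) (pvSet b r c "B")

def solution_313_4_1 (board : List (List String)) (click : List Int) : List (List String) :=
  let m := board.length
  let n := (board.headD []).length
  let mines := pvMines board m n
  let r := click.getD 0 0
  let c := click.getD 1 0
  -- Python indexing board[r][c]: a negative index counts from the end (Pre_ keeps it in range)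
  let ri : Int := if r < 0 then r + m else r
  let ci : Int := if c < 0 then c + n else c
  if pvGet board ri ci = "M" then pvSet board ri ci "X"
  else if pvGet board ri ci = "E" then pvDfsA mines m n (m*n+1) board r c
  else board

-- ===== PORT B =====
-- on-demand count of adjacent mines (B has no table)
def pvCount (b : List (List String)) (m n : Nat) (r c : Int) : Int :=
  pvNbrs.foldl (fun k d =>
    if 0 ≤ r + d.1 ∧ r + d.1 < (m:Int) ∧ 0 ≤ c + d.2 ∧ c + d.2 < (n:Int) ∧ pvGet b (r + d.1) (c + d.2) = "M"
    then k + 1 else k) 0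

def pvReveal (m n : Nat) : Nat → List (List String) → Int → Int → List (List String)
  | 0, b, _, _ => b
  | fuel+1, b, r, c =>
    if r < 0 ∨ (m:Int) ≤ r ∨ c < 0 ∨ (n:Int) ≤ c ∨ pvGet b r c ≠ "E" then b
    else
      let k := pvCount b m n r c
      if 0 < k then pvSet b r c (PySem.Int.toStr k)
      else pvNbrs.foldl (fun b d => pvReveal m n fuel b (r + d.1) (c + d.2)) (pvSet b r c "B")

def solution_313_4_1_alt (board : List (List String)) (click : List Int) : List (List String) :=
  let m := board.length
  let n := (board.headD []).length
  let r := click.getD 0 0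
  let c := click.getD 1 0
  let ri : Int := if r < 0 then r + m else r
  let ci : Int := if c < 0 then c + n else c
  if pvGet board ri ci = "M" then pvSet board ri ci "X"
  else if pvGet board ri ci = "E" then pvReveal m n (m*n+1) board r c
  else board

-- ===== PRECONDITION & SPEC =====
-- Exactly where the Python A returns without raising: a nonempty rectangular board with at least
-- one column, and a two-element click whose indices are in Python range (negative = from the end).
def Pre_solution_313_4_1 (board : List (List String)) (click : List Int) : Prop :=
  board ≠ [] ∧ (board.headD []).length ≠ 0 ∧
  (∀ row ∈ board, row.length = (board.headD []).length) ∧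
  click.length = 2 ∧
  -(board.length : Int) ≤ click.getD 0 0 ∧ click.getD 0 0 < (board.length : Int) ∧
  -((board.headD []).length : Int) ≤ click.getD 1 0 ∧ click.getD 1 0 < ((board.headD []).length : Int)

instance (board : List (List String)) (click : List Int) : Decidable (Pre_solution_313_4_1 board click) := by
  unfold Pre_solution_313_4_1; infer_instance

def pvWitness_solution_313_4_1 : List (List String) × List Int :=
  ([["E", "E", "M"], ["E", "E", "E"]], [0, 0])

def Spec_solution_313_4_1 (board : List (List String)) (click : List Int) (out : List (List String)) : Prop := out = solution_313_4_1_alt board click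
instance (board : List (List String)) (click : List Int) (out : List (List String)) : Decidable (Spec_solution_313_4_1 board click out) := by unfold Spec_solution_313_4_1; infer_instance

-- ===== CLAIM (what is proved, stated in full; the proofs are below) =====
def Claim_equal_solution_313_4_1 : Prop := ∀ (board : List (List String)) (click : List Int), Dom_solution_313_4_1 board click → Pre_solution_313_4_1 board click → Spec_solution_313_4_1 board click (solution_313_4_1 board click)

-- ===== LEMMAS AND PROOFS =====

def pvHit (board : List (List String)) (m n : Nat) (a b : Int) : Int :=
  if 0 ≤ a ∧ a < (m:Int) ∧ 0 ≤ b ∧ b < (n:Int) ∧ pvGet board a b = "M" then 1 else 0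

def pvShape (t : List (List Int)) (m n : Nat) : Prop :=
  t.length = m ∧ ∀ row ∈ t, row.length = n

def pvMsame (board b : List (List String)) : Prop :=
  ∀ r c : Int, 0 ≤ r → 0 ≤ c → (pvGet b r c = "M" ↔ pvGet board r c = "M")

def pvF (board : List (List String)) (r c : Int) (i j : Nat) (d : Int × Int) : Int :=
  if pvGet board (i:Int) (j:Int) = "M" ∧ (i:Int) + d.1 = r ∧ (j:Int) + d.2 = c then 1 else 0

lemma foldl_ite_add {β : Type} (P : β → Prop) [DecidablePred P] (L : List β) (a : Int) :
    L.foldl (fun k d => if P d then k + 1 else k) a = a + (L.map (fun d => if P d then (1:Int) else 0)).sum := by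
  induction L generalizing a with
  | nil => simp
  | cons d L ih => simp only [List.foldl_cons, ih, List.map_cons, List.sum_cons]; split_ifs <;> ring

lemma sum_list_swap {β : Type} (L : List β) (s : Finset ℕ) (f : ℕ → β → Int) :
    ∑ x ∈ s, (L.map (f x)).sum = (L.map (fun d => ∑ x ∈ s, f x d)).sum := by
  induction L with
  | nil => simp
  | cons d L ih => simp [Finset.sum_add_distrib, ih]

lemma sum_indicator_cast (n : Nat) (b : Int) (P : Nat → Prop) [DecidablePred P] :
    (∑ j ∈ Finset.range n, if P j ∧ (j:Int) = b then (1:Int) else 0) =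
      if 0 ≤ b ∧ b < (n:Int) ∧ P b.toNat then 1 else 0 := by
  by_cases hb : 0 ≤ b ∧ b < (n:Int)
  · have hb' : b.toNat < n := by omega
    rw [Finset.sum_eq_single b.toNat]
    · have : ((b.toNat : Int)) = b := Int.toNat_of_nonneg hb.1
      by_cases hP : P b.toNat
      · simp [hP, this, hb.1, hb.2]
      · simp [hP, this]
    · intro j hj hne
      have : (j:Int) ≠ b := by omega
      simp [this]
    · intro h; exact absurd (Finset.mem_range.mpr hb') h
  · rw [if_neg (by tauto)]
    apply Finset.sum_eq_zero; intro j hj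
    have hjn := Finset.mem_range.mp hj
    rw [if_neg]; rintro ⟨-, h2⟩; exact hb ⟨by omega, by omega⟩

lemma g_set {α : Type} (dflt : α) (b : List (List α)) (R C I J : Nat) (v : α) :
  ((b.set R ((b.getD R []).set C v)).getD I []).getD J dflt =
    if I = R ∧ J = C ∧ R < b.length ∧ C < (b.getD R []).length then v
    else (b.getD I []).getD J dflt := by
  by_cases hIR : I = R
  · subst hIR
    by_cases hR : I < b.length
    · have hIrow : b.getD I [] = b[I] := by
        simp [List.getD_eq_getElem?_getD, List.getElem?_eq_getElem hR]
      have hrow : (b.set I ((b.getD I []).set C v)).getD I [] = (b.getD I []).set C v := by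
        simp [List.getD_eq_getElem?_getD, List.getElem?_set, hR]
      rw [hrow]
      by_cases hJC : J = C
      · subst hJC
        by_cases hC : J < (b.getD I []).length
        · rw [hIrow] at hC ⊢
          simp [List.getD_eq_getElem?_getD, List.getElem?_set, hC, hR]
        · rw [hIrow] at hC ⊢
          simp [List.getD_eq_getElem?_getD, List.getElem?_set, hC, hR]
      · simp [List.getD_eq_getElem?_getD, List.getElem?_set, (show C ≠ J by omega), hJC]
    · rw [List.set_eq_of_length_le (by omega)]
      simp [hR]
  · have h2 : (b.set R ((b.getD R []).set C v)).getD I [] = b.getD I [] := by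
      simp [List.getD_eq_getElem?_getD, List.getElem?_set, (show R ≠ I by omega)]
    rw [h2]; simp [hIR]

lemma pvCount_eq_sum (b : List (List String)) (m n : Nat) (r c : Int) :
    pvCount b m n r c = (pvNbrs.map (fun d => pvHit b m n (r + d.1) (c + d.2))).sum := by
  unfold pvCount pvHit
  rw [foldl_ite_add (fun d : Int × Int => 0 ≤ r + d.1 ∧ r + d.1 < (m:Int) ∧ 0 ≤ c + d.2 ∧ c + d.2 < (n:Int) ∧ pvGet b (r + d.1) (c + d.2) = "M")]
  simp

lemma pvCollapse (board : List (List String)) (m n : Nat) (a b : Int) :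
    (∑ i ∈ Finset.range m, ∑ j ∈ Finset.range n,
      (if pvGet board (i:Int) (j:Int) = "M" ∧ (i:Int) = a ∧ (j:Int) = b then (1:Int) else 0)) =
    pvHit board m n a b := by
  have hinner : ∀ i : Nat, (∑ j ∈ Finset.range n,
      (if pvGet board (i:Int) (j:Int) = "M" ∧ (i:Int) = a ∧ (j:Int) = b then (1:Int) else 0)) =
      if (0 ≤ b ∧ b < (n:Int) ∧ pvGet board (i:Int) ((b.toNat:Nat):Int) = "M" ∧ (i:Int) = a) then 1 else 0 := by
    intro i
    have h1 : ∀ j : Nat, (if pvGet board (i:Int) (j:Int) = "M" ∧ (i:Int) = a ∧ (j:Int) = b then (1:Int) else 0)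
        = (if ((pvGet board (i:Int) (j:Int) = "M" ∧ (i:Int) = a) ∧ (j:Int) = b) then (1:Int) else 0) :=
      fun j => if_congr (by tauto) rfl rfl
    rw [Finset.sum_congr rfl (fun j _ => h1 j)]
    rw [sum_indicator_cast n b (fun j => pvGet board (i:Int) (j:Int) = "M" ∧ (i:Int) = a)]
  rw [Finset.sum_congr rfl (fun i _ => hinner i)]
  have h2 : ∀ i : Nat, (if (0 ≤ b ∧ b < (n:Int) ∧ pvGet board (i:Int) ((b.toNat:Nat):Int) = "M" ∧ (i:Int) = a) then (1:Int) else 0)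
      = (if ((0 ≤ b ∧ b < (n:Int) ∧ pvGet board (i:Int) ((b.toNat:Nat):Int) = "M") ∧ (i:Int) = a) then (1:Int) else 0) :=
    fun i => if_congr (by tauto) rfl rfl
  rw [Finset.sum_congr rfl (fun i _ => h2 i)]
  rw [sum_indicator_cast m a (fun i => 0 ≤ b ∧ b < (n:Int) ∧ pvGet board (i:Int) ((b.toNat:Nat):Int) = "M")]
  unfold pvHit
  by_cases ha : 0 ≤ a
  · by_cases hb : 0 ≤ b
    · have ea : ((a.toNat : Nat) : Int) = a := Int.toNat_of_nonneg ha
      have eb : ((b.toNat : Nat) : Int) = b := Int.toNat_of_nonneg hb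
      rw [ea, eb]
    · rw [if_neg (by omega), if_neg (by omega)]
  · rw [if_neg (by omega), if_neg (by omega)]

lemma pvShape_pvSet (t : List (List Int)) (m n : Nat) (r c : Int) (v : Int) (h : pvShape t m n) :
    pvShape (pvSet t r c v) m n := by
  by_cases hr : r.toNat < t.length
  · constructor
    · simp [pvSet, h.1]
    · intro row hrow
      rcases List.mem_or_eq_of_mem_set hrow with h1 | h1
      · exact h.2 row h1
      · subst h1
        rw [List.length_set]
        have : t.getD r.toNat [] = t[r.toNat] := by
          simp [List.getD_eq_getElem?_getD, List.getElem?_eq_getElem hr]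
        rw [this]; exact h.2 _ (List.getElem_mem hr)
  · unfold pvSet
    rw [List.set_eq_of_length_le (by omega)]
    exact h

lemma pvInc_get (board : List (List String)) (m n : Nat) (r c : Int)
    (hr0 : 0 ≤ r) (hrm : r < (m:Int)) (hc0 : 0 ≤ c) (hcn : c < (n:Int))
    (hM : pvGet board r c ≠ "M") (t : List (List Int)) (ht : pvShape t m n) (x y : Int) :
    pvShape (pvInc board m n t x y) m n ∧
    pvGetI (pvInc board m n t x y) r c = pvGetI t r c + (if x = r ∧ y = c then 1 else 0) := by
  unfold pvInc
  by_cases hg : x < 0 ∨ (m:Int) ≤ x ∨ y < 0 ∨ (n:Int) ≤ y ∨ pvGet board x y = "M"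
  · rw [if_pos hg]
    refine ⟨ht, ?_⟩
    rw [if_neg ?_, add_zero]
    rintro ⟨rfl, rfl⟩
    rcases hg with h | h | h | h | h
    · omega
    · omega
    · omega
    · omega
    · exact hM h
  · rw [if_neg hg]
    push_neg at hg
    obtain ⟨hx0, hxm, hy0, hyn, hxyM⟩ := hg
    refine ⟨pvShape_pvSet _ _ _ _ _ _ ht, ?_⟩
    unfold pvGetI pvSet
    rw [g_set]
    by_cases hxy : x = r ∧ y = c
    · obtain ⟨rfl, rfl⟩ := hxy
      have hlen := ht.1
      rw [if_pos, if_pos ⟨rfl, rfl⟩]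
      refine ⟨rfl, rfl, by omega, ?_⟩
      have hlt : x.toNat < t.length := by omega
      have : t.getD x.toNat [] = t[x.toNat] := by
        simp [List.getD_eq_getElem?_getD, List.getElem?_eq_getElem hlt]
      rw [this]
      rw [ht.2 _ (List.getElem_mem hlt)]
      omega
    · rw [if_neg, if_neg hxy, add_zero]
      rintro ⟨h1, h2, -, -⟩
      exact hxy ⟨by omega, by omega⟩

lemma pvOff (board : List (List String)) (m n : Nat) (r c : Int)
    (hr0 : 0 ≤ r) (hrm : r < (m:Int)) (hc0 : 0 ≤ c) (hcn : c < (n:Int))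
    (hM : pvGet board r c ≠ "M") (i j : Nat) :
    ∀ (L : List (Int × Int)) (t : List (List Int)), pvShape t m n →
      pvShape (L.foldl (fun t d => pvInc board m n t ((i:Int) + d.1) ((j:Int) + d.2)) t) m n ∧
      pvGetI (L.foldl (fun t d => pvInc board m n t ((i:Int) + d.1) ((j:Int) + d.2)) t) r c =
        pvGetI t r c + (L.map (fun d => if (i:Int) + d.1 = r ∧ (j:Int) + d.2 = c then (1:Int) else 0)).sum := by
  intro L
  induction L with
  | nil => intro t ht; exact ⟨ht, by simp⟩
  | cons d L ih =>
    intro t ht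
    obtain ⟨hs, hg⟩ := pvInc_get board m n r c hr0 hrm hc0 hcn hM t ht ((i:Int) + d.1) ((j:Int) + d.2)
    obtain ⟨hs', hg'⟩ := ih _ hs
    refine ⟨hs', ?_⟩
    simp only [List.foldl_cons, List.map_cons, List.sum_cons]
    rw [hg', hg]; ring

lemma pvCell (board : List (List String)) (m n : Nat) (r c : Int)
    (hr0 : 0 ≤ r) (hrm : r < (m:Int)) (hc0 : 0 ≤ c) (hcn : c < (n:Int))
    (hM : pvGet board r c ≠ "M") (i j : Nat) (t : List (List Int)) (ht : pvShape t m n) :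
    pvShape ((if pvGet board (i:Int) (j:Int) = "M" then
        pvNbrs.foldl (fun t d => pvInc board m n t ((i:Int) + d.1) ((j:Int) + d.2)) t else t)) m n ∧
    pvGetI ((if pvGet board (i:Int) (j:Int) = "M" then
        pvNbrs.foldl (fun t d => pvInc board m n t ((i:Int) + d.1) ((j:Int) + d.2)) t else t)) r c =
      pvGetI t r c + (pvNbrs.map (pvF board r c i j)).sum := by
  by_cases hij : pvGet board (i:Int) (j:Int) = "M"
  · rw [if_pos hij]
    obtain ⟨hs, hg⟩ := pvOff board m n r c hr0 hrm hc0 hcn hM i j pvNbrs t ht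
    refine ⟨hs, ?_⟩
    rw [hg]
    congr 1
    apply congrArg
    apply List.map_congr_left
    intro d _
    exact if_congr (by tauto) rfl rfl
  · rw [if_neg hij]
    refine ⟨ht, ?_⟩
    have : (pvNbrs.map (pvF board r c i j)).sum = 0 := by
      apply List.sum_eq_zero
      intro x hx
      simp only [List.mem_map] at hx
      obtain ⟨d, -, rfl⟩ := hx
      simp [pvF, hij]
    rw [this, add_zero]

lemma pvCol (board : List (List String)) (m n : Nat) (r c : Int)
    (hr0 : 0 ≤ r) (hrm : r < (m:Int)) (hc0 : 0 ≤ c) (hcn : c < (n:Int))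
    (hM : pvGet board r c ≠ "M") (i : Nat) :
    ∀ (k : Nat) (t : List (List Int)), pvShape t m n →
      pvShape ((List.range k).foldl (fun t (j : Nat) =>
        if pvGet board (i:Int) (j:Int) = "M" then
          pvNbrs.foldl (fun t d => pvInc board m n t ((i:Int) + d.1) ((j:Int) + d.2)) t
        else t) t) m n ∧
      pvGetI ((List.range k).foldl (fun t (j : Nat) =>
        if pvGet board (i:Int) (j:Int) = "M" then
          pvNbrs.foldl (fun t d => pvInc board m n t ((i:Int) + d.1) ((j:Int) + d.2)) t
        else t) t) r c =
        pvGetI t r c + ∑ j ∈ Finset.range k, (pvNbrs.map (pvF board r c i j)).sum := by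
  intro k
  induction k with
  | zero => intro t ht; exact ⟨ht, by simp⟩
  | succ k ih =>
    intro t ht
    rw [List.range_succ]
    obtain ⟨hs, hg⟩ := ih t ht
    rw [List.foldl_append]
    obtain ⟨hs', hg'⟩ := pvCell board m n r c hr0 hrm hc0 hcn hM i k _ hs
    simp only [List.foldl_cons, List.foldl_nil] at hg' ⊢
    refine ⟨hs', ?_⟩
    rw [hg', hg, Finset.sum_range_succ]; ring

lemma pvRows (board : List (List String)) (m n : Nat) (r c : Int)
    (hr0 : 0 ≤ r) (hrm : r < (m:Int)) (hc0 : 0 ≤ c) (hcn : c < (n:Int))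
    (hM : pvGet board r c ≠ "M") :
    ∀ (k : Nat) (t : List (List Int)), pvShape t m n →
      pvShape ((List.range k).foldl (fun t (i : Nat) =>
        (List.range n).foldl (fun t (j : Nat) =>
          if pvGet board (i:Int) (j:Int) = "M" then
            pvNbrs.foldl (fun t d => pvInc board m n t ((i:Int) + d.1) ((j:Int) + d.2)) t
          else t) t) t) m n ∧
      pvGetI ((List.range k).foldl (fun t (i : Nat) =>
        (List.range n).foldl (fun t (j : Nat) =>
          if pvGet board (i:Int) (j:Int) = "M" then
            pvNbrs.foldl (fun t d => pvInc board m n t ((i:Int) + d.1) ((j:Int) + d.2)) t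
          else t) t) t) r c =
        pvGetI t r c + ∑ i ∈ Finset.range k, ∑ j ∈ Finset.range n, (pvNbrs.map (pvF board r c i j)).sum := by
  intro k
  induction k with
  | zero => intro t ht; exact ⟨ht, by simp⟩
  | succ k ih =>
    intro t ht
    rw [List.range_succ, List.foldl_append]
    obtain ⟨hs, hg⟩ := ih t ht
    obtain ⟨hs', hg'⟩ := pvCol board m n r c hr0 hrm hc0 hcn hM k n _ hs
    simp only [List.foldl_cons, List.foldl_nil] at hg' ⊢
    refine ⟨hs', ?_⟩
    rw [hg', hg, Finset.sum_range_succ]; ring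

lemma pvMines_spec (board : List (List String)) (m n : Nat) (r c : Int)
    (hr0 : 0 ≤ r) (hrm : r < (m:Int)) (hc0 : 0 ≤ c) (hcn : c < (n:Int))
    (hM : pvGet board r c ≠ "M") :
    pvGetI (pvMines board m n) r c = pvCount board m n r c := by
  have hshape0 : pvShape (List.replicate m (List.replicate n (0:Int))) m n := by
    refine ⟨by simp, ?_⟩
    intro row hrow
    rw [List.eq_of_mem_replicate hrow]; simp
  have hget0 : pvGetI (List.replicate m (List.replicate n (0:Int))) r c = 0 := by
    unfold pvGetI
    rw [List.getD_replicate _ (show r.toNat < m by omega), List.getD_replicate _ (show c.toNat < n by omega)]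
  obtain ⟨-, hg⟩ := pvRows board m n r c hr0 hrm hc0 hcn hM m _ hshape0
  unfold pvMines
  rw [hg, hget0, zero_add]
  -- swap the grid sum and the neighbour-list sum
  rw [Finset.sum_congr rfl (fun i _ => sum_list_swap pvNbrs (Finset.range n) (fun j d => pvF board r c i j d))]
  rw [sum_list_swap pvNbrs (Finset.range m) (fun i d => ∑ j ∈ Finset.range n, pvF board r c i j d)]
  -- for each neighbour offset, the grid sum collapses to a single cell
  have hcollapse : ∀ d : Int × Int,
      (∑ i ∈ Finset.range m, ∑ j ∈ Finset.range n, pvF board r c i j d) =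
        pvHit board m n (r - d.1) (c - d.2) := by
    intro d
    rw [← pvCollapse board m n (r - d.1) (c - d.2)]
    refine Finset.sum_congr rfl (fun i _ => Finset.sum_congr rfl (fun j _ => ?_))
    unfold pvF
    exact if_congr (by constructor <;> rintro ⟨h1, h2, h3⟩ <;> exact ⟨h1, by omega, by omega⟩) rfl rfl
  rw [List.map_congr_left (fun d _ => hcollapse d)]
  rw [pvCount_eq_sum]
  simp only [pvNbrs, List.map_cons, List.map_nil, List.sum_cons, List.sum_nil]
  ring_nf

lemma pvCount_bounds (b : List (List String)) (m n : Nat) (r c : Int) :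
    0 ≤ pvCount b m n r c ∧ pvCount b m n r c ≤ 8 := by
  have hb : ∀ a b' : Int, 0 ≤ pvHit b m n a b' ∧ pvHit b m n a b' ≤ 1 := by
    intro a b'; unfold pvHit; split_ifs <;> omega
  rw [pvCount_eq_sum]
  simp only [pvNbrs, List.map_cons, List.map_nil, List.sum_cons, List.sum_nil]
  have h1 := hb (r + (-1)) (c + 0)
  have h2 := hb (r + 0) (c + (-1))
  have h3 := hb (r + 1) (c + 0)
  have h4 := hb (r + 0) (c + 1)
  have h5 := hb (r + (-1)) (c + (-1))
  have h6 := hb (r + 1) (c + (-1))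
  have h7 := hb (r + 1) (c + 1)
  have h8 := hb (r + (-1)) (c + 1)
  omega

lemma pvToStr_ne_M (k : Int) (h0 : 0 < k) (h8 : k ≤ 8) : PySem.Int.toStr k ≠ "M" := by
  interval_cases k <;> decide

lemma pvCount_congr (board b : List (List String)) (m n : Nat) (r c : Int)
    (h : pvMsame board b) : pvCount b m n r c = pvCount board m n r c := by
  unfold pvCount
  suffices h8 : ∀ (L : List (Int × Int)) (a : Int),
      L.foldl (fun k d => if 0 ≤ r + d.1 ∧ r + d.1 < (m:Int) ∧ 0 ≤ c + d.2 ∧ c + d.2 < (n:Int) ∧ pvGet b (r + d.1) (c + d.2) = "M" then k + 1 else k) a =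
      L.foldl (fun k d => if 0 ≤ r + d.1 ∧ r + d.1 < (m:Int) ∧ 0 ≤ c + d.2 ∧ c + d.2 < (n:Int) ∧ pvGet board (r + d.1) (c + d.2) = "M" then k + 1 else k) a from
    h8 pvNbrs 0
  intro L
  induction L with
  | nil => intro a; rfl
  | cons d L ihL =>
    intro a
    simp only [List.foldl_cons]
    have hiff : (0 ≤ r + d.1 ∧ r + d.1 < (m:Int) ∧ 0 ≤ c + d.2 ∧ c + d.2 < (n:Int) ∧ pvGet b (r + d.1) (c + d.2) = "M") ↔
        (0 ≤ r + d.1 ∧ r + d.1 < (m:Int) ∧ 0 ≤ c + d.2 ∧ c + d.2 < (n:Int) ∧ pvGet board (r + d.1) (c + d.2) = "M") := by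
      constructor <;> rintro ⟨h1, h2, h3, h4, h5⟩ <;>
        exact ⟨h1, h2, h3, h4, by first | exact (h _ _ h1 h3).mp h5 | exact (h _ _ h1 h3).mpr h5⟩
    rw [if_congr hiff rfl rfl]
    exact ihL _

lemma pvMsame_pvSet (board b : List (List String)) (r c : Int) (v : String)
    (hb : pvMsame board b) (hv : v ≠ "M") (hold : pvGet b r c ≠ "M") (hr : 0 ≤ r) (hc : 0 ≤ c) :
    pvMsame board (pvSet b r c v) := by
  intro i j hi hj
  unfold pvGet pvSet
  rw [g_set]
  by_cases hcond : i.toNat = r.toNat ∧ j.toNat = c.toNat ∧ r.toNat < b.length ∧ c.toNat < (b.getD r.toNat []).length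
  · rw [if_pos hcond]
    have hir : i = r := by omega
    have hjc : j = c := by omega
    subst hir; subst hjc
    constructor
    · intro h; exact absurd h hv
    · intro h; exact absurd ((hb i j hi hj).mpr h) hold
  · rw [if_neg hcond]
    exact hb i j hi hj

lemma pvLockstep (board : List (List String)) (m n : Nat) (fuel : Nat) :
    ∀ b r c, pvMsame board b →
      pvDfsA (pvMines board m n) m n fuel b r c = pvReveal m n fuel b r c ∧
      pvMsame board (pvReveal m n fuel b r c) := by
  induction fuel with
  | zero => intro b r c hb; exact ⟨rfl, hb⟩
  | succ fuel ih =>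
    intro b r c hb
    simp only [pvDfsA, pvReveal]
    by_cases hg : r < 0 ∨ (m:Int) ≤ r ∨ c < 0 ∨ (n:Int) ≤ c ∨ pvGet b r c ≠ "E"
    · rw [if_pos hg, if_pos hg]
      exact ⟨rfl, hb⟩
    · rw [if_neg hg, if_neg hg]
      have hr0 : 0 ≤ r := by by_contra h; exact hg (Or.inl (by omega))
      have hrm : r < (m:Int) := by by_contra h; exact hg (Or.inr (Or.inl (by omega)))
      have hc0 : 0 ≤ c := by by_contra h; exact hg (Or.inr (Or.inr (Or.inl (by omega))))
      have hcn : c < (n:Int) := by by_contra h; exact hg (Or.inr (Or.inr (Or.inr (Or.inl (by omega)))))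
      have hE : pvGet b r c = "E" := by
        by_contra h; exact hg (Or.inr (Or.inr (Or.inr (Or.inr h))))
      have hbM : pvGet b r c ≠ "M" := by rw [hE]; decide
      have hboardM : pvGet board r c ≠ "M" := fun hM => hbM ((hb r c hr0 hc0).mpr hM)
      have hk : pvGetI (pvMines board m n) r c = pvCount b m n r c := by
        rw [pvMines_spec board m n r c hr0 hrm hc0 hcn hboardM,
            pvCount_congr board b m n r c hb]
      rw [hk]
      by_cases hpos : 0 < pvCount b m n r c
      · rw [if_pos hpos, if_pos hpos]
        refine ⟨rfl, ?_⟩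
        exact pvMsame_pvSet board b r c _ hb
          (pvToStr_ne_M _ hpos (pvCount_bounds b m n r c).2) hbM hr0 hc0
      · rw [if_neg hpos, if_neg hpos]
        have hbB : pvMsame board (pvSet b r c "B") :=
          pvMsame_pvSet board b r c "B" hb (by decide) hbM hr0 hc0
        suffices hfold : ∀ (L : List (Int × Int)) (b' : List (List String)), pvMsame board b' →
            L.foldl (fun b d => pvDfsA (pvMines board m n) m n fuel b (r + d.1) (c + d.2)) b' =
              L.foldl (fun b d => pvReveal m n fuel b (r + d.1) (c + d.2)) b' ∧
            pvMsame board (L.foldl (fun b d => pvReveal m n fuel b (r + d.1) (c + d.2)) b') from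
          hfold pvNbrs _ hbB
        intro L
        induction L with
        | nil => intro b' hb'; exact ⟨rfl, hb'⟩
        | cons d L ihL =>
          intro b' hb'
          obtain ⟨he, hm⟩ := ih b' (r + d.1) (c + d.2) hb'
          simp only [List.foldl_cons]
          rw [he]
          exact ihL _ hm

-- ===== VERDICT (by name: the statement is the Claim_ definition above) =====
theorem solution_313_4_1_spec : Claim_equal_solution_313_4_1 := by
  intro board click _ _
  unfold Spec_solution_313_4_1
  simp only [solution_313_4_1, solution_313_4_1_alt]
  by_cases h1 : pvGet board (if click.getD 0 0 < 0 then click.getD 0 0 + (board.length:Int) else click.getD 0 0)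
      (if click.getD 1 0 < 0 then click.getD 1 0 + ((board.headD []).length:Int) else click.getD 1 0) = "M"
  · rw [if_pos h1, if_pos h1]
  · rw [if_neg h1, if_neg h1]
    by_cases h2 : pvGet board (if click.getD 0 0 < 0 then click.getD 0 0 + (board.length:Int) else click.getD 0 0)
        (if click.getD 1 0 < 0 then click.getD 1 0 + ((board.headD []).length:Int) else click.getD 1 0) = "E"
    · rw [if_pos h2, if_pos h2]
      exact (pvLockstep board board.length (board.headD []).length
        (board.length * (board.headD []).length + 1) board (click.getD 0 0) (click.getD 1 0)
        (fun r c _ _ => Iff.rfl)).1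
    · rw [if_neg h2, if_neg h2]
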